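-- pv_equiv track=rewrite | github.com/Bachstelze/rephrase | basic_filter.py | filter_paraphrases
-- ===== SOURCE A (Python) =====
-- def filter_paraphrases(partials, n_results):
--     paraphrases = []
--     for i in range(0, n_results):
--         paraphrase = ''
--         if len(partials) > 0:
--             for j in range(0, len(partials)):
--                 if i >= len(partials[j]):
--                     paraphrase = ''
--                     break
--                 paraphrase += partials[j][i] + ' '
--         if paraphrase != '':
--             paraphrases.append(paraphrase)
--
--     return paraphrases
-- ===== SOURCE B (Python) =====
-- def filter_paraphrases(partials, n_results):
--     if not partials or n_results <= 0:
--         return []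
--     k = min(n_results, min(len(p) for p in partials))
--     if k <= 0:
--         return []
--     buffers = [''] * k
--     for p in partials:
--         for i in range(k):
--             buffers[i] += p[i] + ' '
--     return buffers
-- ===== Notes on version B (the rewrite author's own statement) =====
-- stated objective: alternative
-- what changed: B first computes the output count k = min(n_results, shortest partial length) in closed form (no break logic), then builds all k result strings simultaneously in row-major order: one accumulator buffer per output, each pass over partials appending one word to every buffer, instead of A's column-major outer range(n_results) loop that rebuilds each string in an inner scan with a break.
import Mathlib
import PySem

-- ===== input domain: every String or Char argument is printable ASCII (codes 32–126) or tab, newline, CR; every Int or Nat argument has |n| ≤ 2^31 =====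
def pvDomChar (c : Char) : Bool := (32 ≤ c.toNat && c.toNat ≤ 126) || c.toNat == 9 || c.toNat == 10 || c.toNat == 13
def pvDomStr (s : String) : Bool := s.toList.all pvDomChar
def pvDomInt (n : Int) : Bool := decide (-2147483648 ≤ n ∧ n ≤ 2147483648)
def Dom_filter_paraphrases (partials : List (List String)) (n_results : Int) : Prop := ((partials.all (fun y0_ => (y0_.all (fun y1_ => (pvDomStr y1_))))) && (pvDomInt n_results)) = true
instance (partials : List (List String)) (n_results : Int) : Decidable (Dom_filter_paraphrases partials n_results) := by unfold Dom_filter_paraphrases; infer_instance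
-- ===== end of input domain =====

-- B computes the output count k = min(n_results, shortest length) up front, then builds all k
-- strings together row-by-row (one buffer per output), instead of A's column-major loops with
-- a break (objective: alternative).

-- ===== PORT A =====
-- inner 'for j in range(0, len(partials))' with break; i ≥ 0 always (it comes from range(0, n_results))
def pvRowA : List (List String) → Int → String → String
  | [], _, paraphrase => paraphrase
  | pj :: rest, i, paraphrase =>
      if i ≥ (pj.length : Int) then ""      -- 'paraphrase = ""; break'
      else pvRowA rest i (paraphrase ++ PySem.List.pyGetD pj i "" ++ " ")

def filter_paraphrases (partials : List (List String)) (n_results : Int) : List String :=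
  (PySem.List.pyRange 0 n_results 1).foldl
    (fun paraphrases i =>
      let paraphrase : String :=
        if partials.length > 0 then pvRowA partials i "" else ""
      if paraphrase ≠ "" then paraphrases ++ [paraphrase] else paraphrases)
    []

-- ===== PORT B =====
-- 'min(len(p) for p in partials)' on a nonempty list (PySem.List.min?, fallback never used),
-- then 'buffers[i] += p[i] + " "' as List.set/getD (index always in range: i < k ≤ len(p)).
def filter_paraphrases_alt (partials : List (List String)) (n_results : Int) : List String :=
  if partials = [] ∨ n_results ≤ 0 then []
  else
    let m : Int := (PySem.List.min? (partials.map (fun p => (p.length : Int))) (fun x => x)).getD 0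
    let k : Int := min n_results m
    if k ≤ 0 then []
    else
      partials.foldl
        (fun bufs p =>
          (List.range k.toNat).foldl
            (fun bufs i => bufs.set i (bufs.getD i "" ++ (PySem.List.pyGetD p (i : Int) "" ++ " ")))
            bufs)
        (List.replicate k.toNat "")

-- ===== PRECONDITION & SPEC =====
def Spec_filter_paraphrases (partials : List (List String)) (n_results : Int) (out : List String) : Prop := out = filter_paraphrases_alt partials n_results
instance (partials : List (List String)) (n_results : Int) (out : List String) : Decidable (Spec_filter_paraphrases partials n_results out) := by unfold Spec_filter_paraphrases; infer_instance

-- ===== CLAIM (what is proved, stated in full; the proofs are below) =====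
def Claim_equal_filter_paraphrases : Prop := ∀ (partials : List (List String)) (n_results : Int), Dom_filter_paraphrases partials n_results → Spec_filter_paraphrases partials n_results (filter_paraphrases partials n_results)

-- ===== LEMMAS AND PROOFS =====

-- minimal length of the lists (0 for the empty family)
def pvMinL : List (List String) → Nat
  | [] => 0
  | [p] => p.length
  | p :: q :: rest => min p.length (pvMinL (q :: rest))

-- the string A builds for column i
def pvColCat : List (List String) → Int → String
  | [], _ => ""
  | p :: rest, i => PySem.List.pyGetD p i "" ++ " " ++ pvColCat rest i

theorem pvMinL_all (ps : List (List String)) (k : Nat) (h : k < pvMinL ps) :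
    ∀ p ∈ ps, k < p.length := by
  induction ps with
  | nil => simp
  | cons p rest ih =>
    intro q hq
    cases rest with
    | nil =>
      simp only [pvMinL] at h
      rcases List.mem_cons.mp hq with rfl | hq'
      · exact h
      · simp at hq'
    | cons r rs =>
      simp only [pvMinL, lt_min_iff] at h
      rcases List.mem_cons.mp hq with rfl | hq'
      · exact h.1
      · exact ih h.2 q hq'

theorem pvMinL_exists (ps : List (List String)) (k : Nat) (hne : ps ≠ [])
    (h : pvMinL ps ≤ k) : ∃ p ∈ ps, p.length ≤ k := by
  induction ps with
  | nil => exact absurd rfl hne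
  | cons p rest ih =>
    cases rest with
    | nil => exact ⟨p, by simp, by simpa [pvMinL] using h⟩
    | cons r rs =>
      simp only [pvMinL, min_le_iff] at h
      rcases h with h | h
      · exact ⟨p, by simp, h⟩
      · rcases ih (by simp) h with ⟨q, hq, hlq⟩
        exact ⟨q, List.mem_cons_of_mem _ hq, hlq⟩

theorem pvColCat_ne (ps : List (List String)) (i : Int) (h : ps ≠ []) :
    pvColCat ps i ≠ "" := by
  cases ps with
  | nil => exact absurd rfl h
  | cons p rest =>
    have hne : (pvColCat (p :: rest) i).toList ≠ [] := by
      simp [pvColCat, String.toList_append]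
    intro he
    rw [he] at hne
    simp at hne

theorem pvRowA_all (ps : List (List String)) (i : Int) (acc : String)
    (h : ∀ p ∈ ps, i < (p.length : Int)) :
    pvRowA ps i acc = acc ++ pvColCat ps i := by
  induction ps generalizing acc with
  | nil => simp [pvRowA, pvColCat]
  | cons p rest ih =>
    have hp : ¬ i ≥ (p.length : Int) := by
      have := h p (by simp); omega
    rw [pvRowA, if_neg hp, ih _ (fun q hq => h q (List.mem_cons_of_mem _ hq))]
    simp [pvColCat, String.append_assoc]

theorem pvRowA_short (ps : List (List String)) (i : Int) (acc : String)
    (h : ∃ p ∈ ps, (p.length : Int) ≤ i) :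
    pvRowA ps i acc = "" := by
  induction ps generalizing acc with
  | nil => simp at h
  | cons p rest ih =>
    by_cases hp : i ≥ (p.length : Int)
    · rw [pvRowA, if_pos hp]
    · rw [pvRowA, if_neg hp]
      apply ih
      rcases h with ⟨q, hq, hlq⟩
      rcases List.mem_cons.mp hq with rfl | hq'
      · omega
      · exact ⟨q, hq', hlq⟩

theorem pvFoldA (ps : List (List String)) (m : Nat) :
    ((PySem.List.pyRange 0 (m : Int) 1).foldl
      (fun paraphrases i =>
        let paraphrase : String :=
          if ps.length > 0 then pvRowA ps i "" else ""
        if paraphrase ≠ "" then paraphrases ++ [paraphrase] else paraphrases) []) =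
    (List.range (min m (pvMinL ps))).map (fun k : Nat => pvColCat ps (k : Int)) := by
  induction m with
  | zero => simp [PySem.List.pyRange_one_eq_nil]
  | succ m ih =>
    have hr : PySem.List.pyRange 0 ((m + 1 : Nat) : Int) 1
        = PySem.List.pyRange 0 (m : Int) 1 ++ [(m : Int)] := by
      push_cast
      exact PySem.List.pyRange_one_succ_right (by positivity)
    rw [hr, List.foldl_append, ih]
    simp only [List.foldl]
    by_cases hps : ps = []
    · subst hps; simp [pvMinL]
    · have hlen : 0 < ps.length := List.length_pos_iff.mpr hps
      by_cases hm : m < pvMinL ps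
      · have hall : ∀ p ∈ ps, ((m : Int) < (p.length : Int)) := by
          intro p hp
          exact_mod_cast pvMinL_all ps m hm p hp
        rw [if_pos hlen, pvRowA_all ps _ _ hall, String.empty_append]
        rw [if_pos (pvColCat_ne ps _ hps)]
        have h1 : min m (pvMinL ps) = m := by omega
        have h2 : min (m + 1) (pvMinL ps) = m + 1 := by omega
        rw [h1, h2, List.range_succ]
        simp
      · have hsh : ∃ p ∈ ps, ((p.length : Int) ≤ (m : Int)) := by
          rcases pvMinL_exists ps m hps (by omega) with ⟨p, hp, hl⟩
          exact ⟨p, hp, by exact_mod_cast hl⟩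
        rw [if_pos hlen, pvRowA_short ps _ _ hsh]
        simp only [ne_eq, not_true_eq_false, if_false]
        have h3 : min (m + 1) (pvMinL ps) = min m (pvMinL ps) := by omega
        rw [h3]

theorem filter_paraphrases_A_ref (ps : List (List String)) (n : Int) :
    filter_paraphrases ps n =
      (List.range (min n.toNat (pvMinL ps))).map (fun k : Nat => pvColCat ps (k : Int)) := by
  unfold filter_paraphrases
  by_cases hn : 0 ≤ n
  · have hcast : n = ((n.toNat : Nat) : Int) := by omega
    rw [hcast]
    exact pvFoldA ps n.toNat
  · have h0 : n.toNat = 0 := by omega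
    rw [PySem.List.pyRange_one_eq_nil (by omega), h0]
    simp

-- B side ------------------------------------------------------------------

theorem pvMinL_le_of_mem (ps : List (List String)) (p : List String) (h : p ∈ ps) :
    pvMinL ps ≤ p.length := by
  induction ps with
  | nil => simp at h
  | cons q rest ih =>
    cases rest with
    | nil =>
      rcases List.mem_cons.mp h with rfl | h'
      · simp [pvMinL]
      · simp at h'
    | cons r rs =>
      simp only [pvMinL, min_le_iff]
      rcases List.mem_cons.mp h with rfl | h'
      · exact Or.inl le_rfl
      · exact Or.inr (ih h')

-- Python's min over the lengths equals pvMinL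
theorem pvFoldlMinNat (ps : List (List String)) (hne : ps ≠ []) :
    ∀ a : Nat, (ps.map List.length).foldl min a = min a (pvMinL ps) := by
  induction ps with
  | nil => exact absurd rfl hne
  | cons q rest ih =>
    intro a
    cases rest with
    | nil => simp [pvMinL]
    | cons r rs =>
      rw [List.map_cons, List.foldl_cons]
      rw [ih (by simp) (min a q.length)]
      simp only [pvMinL]
      omega

theorem pvFoldlMinInt (l : List (List String)) :
    ∀ a : Nat, (l.map (fun p => (p.length : Int))).foldl min ((a : Nat) : Int)
      = (((l.map List.length).foldl min a : Nat) : Int) := by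
  induction l with
  | nil => intro a; simp
  | cons q rest ih =>
    intro a
    simp only [List.map_cons, List.foldl_cons]
    have : min ((a : Nat) : Int) ((q.length : Nat) : Int) = (((min a q.length : Nat)) : Int) := by
      omega
    rw [this, ih]

theorem pvMin?_eq (ps : List (List String)) (hne : ps ≠ []) :
    (PySem.List.min? (ps.map (fun p => (p.length : Int))) (fun x => x)).getD 0
      = (pvMinL ps : Int) := by
  cases ps with
  | nil => exact absurd rfl hne
  | cons p rest =>
    simp only [List.map_cons]
    rw [PySem.List.min?_id_cons]
    simp only [Option.getD_some]
    rw [pvFoldlMinInt rest p.length]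
    cases rest with
    | nil => simp [pvMinL]
    | cons r rs =>
      rw [pvFoldlMinNat (r :: rs) (by simp) p.length]
      simp only [pvMinL]

-- the inner 'for i in range(k)' pass over buffers that hold f i
theorem pvInnerFold (k : Nat) (g : Nat → String) :
    ∀ (m : Nat), m ≤ k → ∀ (f : Nat → String),
      (List.range m).foldl (fun bufs i => bufs.set i (bufs.getD i "" ++ g i))
          ((List.range k).map f)
        = (List.range k).map (fun i => if i < m then f i ++ g i else f i) := by
  intro m
  induction m with
  | zero =>
    intro _ f
    simp
  | succ m ih =>
    intro hm f
    rw [List.range_succ, List.foldl_append, ih (by omega) f]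
    simp only [List.foldl]
    have hget : (((List.range k).map fun i => if i < m then f i ++ g i else f i).getD m "")
        = f m := by
      have hmk : m < k := by omega
      simp [List.getD, hmk]
    rw [hget]
    apply List.ext_getElem
    · simp
    · intro j hj1 hj2
      have hjk : j < k := by simpa using hj2
      by_cases hjm : j = m
      · subst hjm
        rw [List.getElem_set_self (by simpa using hj1)]
        simp
      · rw [List.getElem_set_ne (by omega)]
        simp only [List.getElem_map, List.getElem_range]
        by_cases hlt : j < m
        · have hlt' : j < m + 1 := by omega
          simp [hlt, hlt']
        · have hlt' : ¬ j < m + 1 := by omega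
          simp [hlt, hlt']

theorem pvColCat_append (a b : List (List String)) (i : Int) :
    pvColCat (a ++ b) i = pvColCat a i ++ pvColCat b i := by
  induction a with
  | nil => simp [pvColCat]
  | cons p rest ih =>
    simp [pvColCat, ih, String.append_assoc]


theorem pvOuterFold (k : Nat) (ps : List (List String)) (hall : ∀ p ∈ ps, k ≤ p.length) :
    ∀ pre : List (List String),
      (ps.foldl
        (fun bufs p =>
          (List.range k).foldl
            (fun bufs i => bufs.set i (bufs.getD i "" ++ (PySem.List.pyGetD p (i : Int) "" ++ " ")))
            bufs)
        ((List.range k).map (fun i : Nat => pvColCat pre (i : Int))))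
      = (List.range k).map (fun i : Nat => pvColCat (pre ++ ps) (i : Int)) := by
  induction ps with
  | nil => intro pre; simp
  | cons p rest ih =>
    intro pre
    simp only [List.foldl_cons]
    rw [pvInnerFold k _ k le_rfl]
    have hstep : ((List.range k).map fun i =>
        if i < k then pvColCat pre (i : Int) ++ (PySem.List.pyGetD p (i : Int) "" ++ " ")
        else pvColCat pre (i : Int))
        = (List.range k).map (fun i : Nat => pvColCat (pre ++ [p]) (i : Int)) := by
      apply List.map_congr_left
      intro i hi
      have hik : i < k := List.mem_range.mp hi
      rw [if_pos hik, pvColCat_append]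
      simp [pvColCat]
    rw [hstep, ih (fun q hq => hall q (List.mem_cons_of_mem _ hq)) (pre ++ [p])]
    simp

theorem filter_paraphrases_B_ref (ps : List (List String)) (n : Int) :
    filter_paraphrases_alt ps n =
      (List.range (min n.toNat (pvMinL ps))).map (fun k : Nat => pvColCat ps (k : Int)) := by
  unfold filter_paraphrases_alt
  by_cases h0 : ps = [] ∨ n ≤ 0
  · rw [if_pos h0]
    rcases h0 with rfl | hn
    · simp [pvMinL]
    · have : n.toNat = 0 := by omega
      simp [this]
  · rw [if_neg h0]
    obtain ⟨hps, hn⟩ := not_or.mp h0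
    rw [pvMin?_eq ps hps]
    by_cases hk : min n (pvMinL ps : Int) ≤ 0
    · rw [if_pos hk]
      have hm0 : pvMinL ps = 0 := by omega
      simp [hm0]
    · rw [if_neg hk]
      have hkt : (min n (pvMinL ps : Int)).toNat = min n.toNat (pvMinL ps) := by omega
      rw [hkt]
      have hall : ∀ p ∈ ps, min n.toNat (pvMinL ps) ≤ p.length := by
        intro p hp
        have := pvMinL_le_of_mem ps p hp
        omega
      have hinit : List.replicate (min n.toNat (pvMinL ps)) ""
          = (List.range (min n.toNat (pvMinL ps))).map (fun i : Nat => pvColCat [] (i : Int)) := by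
        simp [pvColCat, List.map_const']
      rw [hinit, pvOuterFold _ ps hall []]
      simp

-- ===== VERDICT (by name: the statement is the Claim_ definition above) =====
theorem filter_paraphrases_spec : Claim_equal_filter_paraphrases := by
  intro ps n _
  unfold Spec_filter_paraphrases
  rw [filter_paraphrases_A_ref, filter_paraphrases_B_ref]
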